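-- pv_equiv track=rewrite | github.com/ray0nyx/0nyxtechtoken | python-backend/services/swap_stream.py | detect_pump_fun_migration
-- ===== SOURCE A (Python) =====
-- PUMP_FUN_PROGRAM = "6EF8rrecthR5Dkzon8Nwu78hRvfCKubJ14M5uBEwF6P"
--
-- RAYDIUM_AMM_V4 = "675kPX9MHTjS2zt1qfr1NYHuzeLXfQM9H24wFSUt1Mp8"
--
-- def detect_pump_fun_migration(tx: dict) -> bool:
--     """
--     Detect if a transaction represents a Pump.fun -> Raydium migration.
--
--     Migration indicators:
--     1. Bonding curve completion (market cap reaches ~$69k)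
--     2. Liquidity added to Raydium in same or adjacent block
--     3. Creator wallet receives SOL proceeds
--     """
--     if not tx:
--         return False
--
--     instructions = tx.get("instructions", [])
--
--     has_pump_fun = False
--     has_raydium_pool_create = False
--
--     for ix in instructions:
--         program_id = ix.get("programId", "")
--
--         if program_id == PUMP_FUN_PROGRAM:
--             # Check for bonding curve completion instruction
--             # This would require parsing the specific instruction data
--             has_pump_fun = True
--
--         elif program_id == RAYDIUM_AMM_V4:
--             # Check for pool initialization
--             has_raydium_pool_create = True
--
--     # Simple heuristic: both programs present suggests migration
--     return has_pump_fun and has_raydium_pool_create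
-- ===== SOURCE B (Python) =====
-- PUMP_FUN_PROGRAM = "6EF8rrecthR5Dkzon8Nwu78hRvfCKubJ14M5uBEwF6P"
--
-- RAYDIUM_AMM_V4 = "675kPX9MHTjS2zt1qfr1NYHuzeLXfQM9H24wFSUt1Mp8"
--
--
-- def _mentions(instructions, program):
--     """Short-circuiting scan: does any instruction target this program?"""
--     return any(ix.get("programId", "") == program for ix in instructions)
--
--
-- def detect_pump_fun_migration(tx: dict) -> bool:
--     if not tx:
--         return False
--     instructions = tx.get("instructions", [])
--     return _mentions(instructions, PUMP_FUN_PROGRAM) and _mentions(instructions, RAYDIUM_AMM_V4)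
-- ===== Notes on version B (the rewrite author's own statement) =====
-- stated objective: idiomatic
-- what changed: A runs one loop carrying two mutable boolean flags through an if/elif chain; B drops the flag accumulator and the single combined pass entirely, decomposing the question into two independent short-circuiting any() scans (one per program ID) joined by 'and' -- the second scan is not even started when the first finds nothing.
import Mathlib
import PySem

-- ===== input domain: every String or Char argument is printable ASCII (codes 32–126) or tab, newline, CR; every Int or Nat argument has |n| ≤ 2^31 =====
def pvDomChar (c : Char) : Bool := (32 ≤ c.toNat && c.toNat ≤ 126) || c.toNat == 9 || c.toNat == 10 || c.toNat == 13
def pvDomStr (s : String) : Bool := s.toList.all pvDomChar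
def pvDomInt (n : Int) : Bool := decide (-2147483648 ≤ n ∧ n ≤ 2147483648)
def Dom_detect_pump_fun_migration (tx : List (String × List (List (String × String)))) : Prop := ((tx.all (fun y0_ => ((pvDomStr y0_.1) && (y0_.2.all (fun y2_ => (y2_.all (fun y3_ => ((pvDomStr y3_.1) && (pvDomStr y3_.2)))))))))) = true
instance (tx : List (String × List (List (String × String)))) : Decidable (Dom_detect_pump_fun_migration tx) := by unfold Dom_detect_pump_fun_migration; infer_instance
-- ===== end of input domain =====

-- B replaces A's single flag-carrying loop by two independent short-circuiting
-- membership scans, one per program ID, joined by 'and' (idiomatic; same O(n) cost).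

-- ===== PORT A =====
def detect_pump_fun_migration (tx : List (String × List (List (String × String)))) : Bool :=
  if tx.isEmpty then false
  else
    let instructions := (PySem.Dict.mk tx).getD "instructions" []
    let flags := instructions.foldl (fun (st : Bool × Bool) ix =>
      let program_id := (PySem.Dict.mk ix).getD "programId" ""
      if program_id = "6EF8rrecthR5Dkzon8Nwu78hRvfCKubJ14M5uBEwF6P" then (true, st.2)
      else if program_id = "675kPX9MHTjS2zt1qfr1NYHuzeLXfQM9H24wFSUt1Mp8" then (st.1, true)
      else st) (false, false)
    flags.1 && flags.2

-- ===== PORT B =====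
-- _mentions: Python's any(ix.get("programId","") == program for ix in instructions)
def pvMentions (instructions : List (List (String × String))) (program : String) : Bool :=
  instructions.any (fun ix => (PySem.Dict.mk ix).getD "programId" "" = program)

def detect_pump_fun_migration_alt (tx : List (String × List (List (String × String)))) : Bool :=
  if tx.isEmpty then false
  else
    let instructions := (PySem.Dict.mk tx).getD "instructions" []
    pvMentions instructions "6EF8rrecthR5Dkzon8Nwu78hRvfCKubJ14M5uBEwF6P" &&
    pvMentions instructions "675kPX9MHTjS2zt1qfr1NYHuzeLXfQM9H24wFSUt1Mp8"

-- ===== PRECONDITION & SPEC =====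
def Spec_detect_pump_fun_migration (tx : List (String × List (List (String × String)))) (out : Bool) : Prop := out = detect_pump_fun_migration_alt tx
instance (tx : List (String × List (List (String × String)))) (out : Bool) : Decidable (Spec_detect_pump_fun_migration tx out) := by unfold Spec_detect_pump_fun_migration; infer_instance

-- ===== CLAIM (what is proved, stated in full; the proofs are below) =====
def Claim_equal_detect_pump_fun_migration : Prop := ∀ (tx : List (String × List (List (String × String)))), Dom_detect_pump_fun_migration tx → Spec_detect_pump_fun_migration tx (detect_pump_fun_migration tx)

-- ===== LEMMAS AND PROOFS =====

-- A's flag loop computes pointwise disjunctions over the list of program IDs.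
theorem pv_loop_eq (l : List (List (String × String))) (p r : Bool) :
    l.foldl (fun (st : Bool × Bool) ix =>
      let program_id := (PySem.Dict.mk ix).getD "programId" ""
      if program_id = "6EF8rrecthR5Dkzon8Nwu78hRvfCKubJ14M5uBEwF6P" then (true, st.2)
      else if program_id = "675kPX9MHTjS2zt1qfr1NYHuzeLXfQM9H24wFSUt1Mp8" then (st.1, true)
      else st) (p, r)
    = (p || l.any (fun ix => (PySem.Dict.mk ix).getD "programId" "" = "6EF8rrecthR5Dkzon8Nwu78hRvfCKubJ14M5uBEwF6P"),
       r || l.any (fun ix => (PySem.Dict.mk ix).getD "programId" "" = "675kPX9MHTjS2zt1qfr1NYHuzeLXfQM9H24wFSUt1Mp8")) := by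
  induction l generalizing p r with
  | nil => simp
  | cons ix rest ih =>
    simp only [List.foldl_cons, List.any_cons]
    split_ifs with h1 h2
    · rw [ih]; simp [h1]
    · rw [ih]; simp [h2]
    · rw [ih]; simp [h1, h2]

-- ===== VERDICT (by name: the statement is the Claim_ definition above) =====
theorem detect_pump_fun_migration_spec : Claim_equal_detect_pump_fun_migration := by
  intro tx _
  unfold Spec_detect_pump_fun_migration detect_pump_fun_migration detect_pump_fun_migration_alt pvMentions
  by_cases h : tx.isEmpty
  · simp [h]
  · rw [if_neg h, if_neg h]
    dsimp only
    rw [pv_loop_eq]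
    simp
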